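-- pv_equiv track=rewrite | github.com/paiml/depyler | examples/hard_sequence_generation.py | juggler_sequence
-- ===== SOURCE A (Python) =====
-- def juggler_sequence(n: int) -> list[int]:
--     """Generate juggler sequence starting from n until it reaches 1."""
--     result: list[int] = [n]
--     current: int = n
--     steps: int = 0
--     while current != 1 and steps < 100:
--         if current % 2 == 0:
--             # Integer square root for even
--             root: int = 1
--             while (root + 1) * (root + 1) <= current:
--                 root = root + 1
--             current = root
--         else:
--             # n^(3/2) = n * sqrt(n)
--             root2: int = 1
--             while (root2 + 1) * (root2 + 1) <= current:
--                 root2 = root2 + 1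
--             current = current * root2
--         result.append(current)
--         steps = steps + 1
--     return result
-- ===== SOURCE B (Python) =====
-- def juggler_sequence(n: int) -> list[int]:
--     """Generate juggler sequence starting from n until it reaches 1."""
--     result: list[int] = [n]
--     current: int = n
--     steps: int = 0
--     while current != 1 and steps < 100:
--         # largest r >= 1 with r*r <= current (1 if none), by integer binary search
--         lo: int = 1
--         hi: int = current if current > 1 else 1
--         while lo < hi:
--             mid: int = (lo + hi + 1) // 2
--             if mid * mid <= current:
--                 lo = mid
--             else:
--                 hi = mid - 1
--         if current % 2 == 0:
--             current = lo
--         else: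
--             current = current * lo
--         result.append(current)
--         steps = steps + 1
--     return result
-- ===== Notes on version B (the rewrite author's own statement) =====
-- stated objective: faster
-- what changed: Each step's integer square root is computed by an exact integer binary search on an interval instead of A's incremental linear upward scan; intended as faster (timing: A timed out at n=64 where B returned; at the largest size both finished B measured ~19x, below the 5 ms floor).
import Mathlib
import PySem

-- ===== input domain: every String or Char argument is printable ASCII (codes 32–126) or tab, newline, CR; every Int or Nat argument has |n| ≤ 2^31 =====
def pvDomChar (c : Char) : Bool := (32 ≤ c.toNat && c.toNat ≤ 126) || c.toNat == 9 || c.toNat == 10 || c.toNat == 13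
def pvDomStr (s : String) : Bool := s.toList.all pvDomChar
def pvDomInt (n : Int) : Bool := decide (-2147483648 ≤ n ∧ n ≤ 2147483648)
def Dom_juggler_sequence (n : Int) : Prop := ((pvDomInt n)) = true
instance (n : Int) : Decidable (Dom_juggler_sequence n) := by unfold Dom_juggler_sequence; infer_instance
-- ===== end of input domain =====

-- B computes each step's integer square root by exact integer binary search instead of A's incremental linear scan; intended as faster (timing: A timed out at size 64 where B returned; ratio at the largest size both finished was not confirmable).

-- ===== PORT A =====
-- A's inner while loop: increment the candidate while its successor's square still fits.
def jugRootA (current root : Int) : Int :=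
  if (root + 1) * (root + 1) ≤ current then jugRootA current (root + 1) else root
termination_by (current - root).toNat
decreasing_by
  have : root < current := by nlinarith [sq_nonneg (root + 1)]
  omega

-- A's outer while loop (result/current/steps state).
def jugLoopA (result : List Int) (current steps : Int) : List Int :=
  if h : current ≠ 1 ∧ steps < 100 then
    let c' := if PySem.Int.mod current 2 = 0 then jugRootA current 1
              else current * jugRootA current 1
    jugLoopA (result ++ [c']) c' (steps + 1)
  else result
termination_by (100 - steps).toNat
decreasing_by omega

def juggler_sequence (n : Int) : List Int := jugLoopA [n] n 0

-- ===== PORT B =====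
-- B's inner binary search: largest r in [lo,hi] with r*r <= current (invariants established by the caller).
def jugSearchB (current lo hi : Int) : Int :=
  if h : lo < hi then
    let mid := PySem.Int.floordiv (lo + hi + 1) 2
    if mid * mid ≤ current then jugSearchB current mid hi
    else jugSearchB current lo (mid - 1)
  else lo
termination_by (hi - lo).toNat
decreasing_by
  · have hb := PySem.Int.floordiv_two_mid_bounds (lo := lo + 1) (hi := hi) (by omega)
    have he : lo + 1 + hi = lo + hi + 1 := by ring
    rw [he] at hb
    omega
  · have hb := PySem.Int.floordiv_two_mid_bounds (lo := lo + 1) (hi := hi) (by omega)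
    have he : lo + 1 + hi = lo + hi + 1 := by ring
    rw [he] at hb
    omega

def jugLoopB (result : List Int) (current steps : Int) : List Int :=
  if h : current ≠ 1 ∧ steps < 100 then
    let r := jugSearchB current 1 (if current > 1 then current else 1)
    let c' := if PySem.Int.mod current 2 = 0 then r else current * r
    jugLoopB (result ++ [c']) c' (steps + 1)
  else result
termination_by (100 - steps).toNat
decreasing_by omega

def juggler_sequence_alt (n : Int) : List Int := jugLoopB [n] n 0

-- ===== PRECONDITION & SPEC =====
def Spec_juggler_sequence (n : Int) (out : List Int) : Prop := out = juggler_sequence_alt n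
instance (n : Int) (out : List Int) : Decidable (Spec_juggler_sequence n out) := by unfold Spec_juggler_sequence; infer_instance

-- ===== CLAIM (what is proved, stated in full; the proofs are below) =====
def Claim_equal_juggler_sequence : Prop := ∀ (n : Int), Dom_juggler_sequence n → Spec_juggler_sequence n (juggler_sequence n)

-- ===== LEMMAS AND PROOFS =====

-- the characterisation both root computations satisfy
def JugRootSpec (current r : Int) : Prop :=
  1 ≤ r ∧ current < (r + 1) * (r + 1) ∧ (r * r ≤ current ∨ r = 1)

theorem jugRootSpec_unique {c r1 r2 : Int} (h1 : JugRootSpec c r1) (h2 : JugRootSpec c r2) :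
    r1 = r2 := by
  obtain ⟨a1, b1, c1⟩ := h1
  obtain ⟨a2, b2, c2⟩ := h2
  by_contra hne
  rcases lt_or_gt_of_ne hne with h | h
  · rcases c2 with hc | hc
    · nlinarith
    · omega
  · rcases c1 with hc | hc
    · nlinarith
    · omega

theorem jugRootA_spec (c root : Int) (h1 : 1 ≤ root) (h2 : root * root ≤ c ∨ root = 1) :
    JugRootSpec c (jugRootA c root) := by
  revert h1 h2
  fun_induction jugRootA c root with
  | case1 root hle ih =>
    intro h1 _
    exact ih (by omega) (Or.inl hle)
  | case2 root hgt =>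
    intro h1 h2
    exact ⟨h1, by omega, h2⟩

theorem jugSearchB_spec (c lo hi : Int) (h1 : 1 ≤ lo) (h2 : lo ≤ hi)
    (h3 : lo * lo ≤ c ∨ lo = 1) (h4 : c < (hi + 1) * (hi + 1)) :
    JugRootSpec c (jugSearchB c lo hi) := by
  revert h1 h2 h3 h4
  fun_induction jugSearchB c lo hi with
  | case1 lo hi hlt mid hle ih =>
    intro _ _ _ h4
    have hmid := PySem.Int.floordiv_two_mid_bounds (lo := lo + 1) (hi := hi) (by omega)
    have heq : lo + 1 + hi = lo + hi + 1 := by ring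
    rw [heq] at hmid
    exact ih (by omega) (by omega) (Or.inl hle) h4
  | case2 lo hi hlt mid hgt ih =>
    intro h1 _ h3 _
    have hmid := PySem.Int.floordiv_two_mid_bounds (lo := lo + 1) (hi := hi) (by omega)
    have heq : lo + 1 + hi = lo + hi + 1 := by ring
    rw [heq] at hmid
    refine ih h1 (by omega) h3 ?_
    have hm : mid - 1 + 1 = mid := by ring
    rw [hm]
    omega
  | case3 lo hi hge =>
    intro h1 h2 h3 h4
    have hlohi : lo = hi := by omega
    subst hlohi
    exact ⟨h1, h4, h3⟩

theorem roots_eq (c : Int) :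
    jugRootA c 1 = jugSearchB c 1 (if c > 1 then c else 1) := by
  apply jugRootSpec_unique (jugRootA_spec c 1 (by omega) (Or.inr rfl))
  apply jugSearchB_spec
  · omega
  · split <;> omega
  · exact Or.inr rfl
  · split <;> nlinarith

theorem loops_eq (result : List Int) (current steps : Int) :
    jugLoopA result current steps = jugLoopB result current steps := by
  fun_induction jugLoopA result current steps with
  | case1 result current steps h c' ih =>
    rw [jugLoopB, dif_pos h]
    show _ = jugLoopB _ _ _
    rw [← roots_eq]
    exact ih
  | case2 result current steps h =>
    rw [jugLoopB, dif_neg h]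

-- ===== VERDICT (by name: the statement is the Claim_ definition above) =====
theorem juggler_sequence_spec : Claim_equal_juggler_sequence := by
  intro n _
  show juggler_sequence n = juggler_sequence_alt n
  unfold juggler_sequence juggler_sequence_alt
  exact loops_eq [n] n 0
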